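-- pv_equiv track=rewrite | github.com/cheks123/coding-challenge-solutions | distinct_pair.py | noOfPairs
-- ===== SOURCE A (Python) =====
-- def noOfPairs(box):
--     false = 0
--     r = []
--     for i in range(len(box)):
--         for k in box[i+1:]:
--             r.append(box[i]+k)
--     for a in r:
--         odd = 0
--         for t in set(a):
--             if a.count(t) % 2 == 1:
--                 odd += 1
--             if odd > 1:
--                 false += 1
--                 break
--     return len(r) - false
-- ===== SOURCE B (Python) =====
-- def noOfPairs(box):
--     # Reduce each string once to its odd-parity character set; a pair concatenates
--     # to a palindrome-permutable string iff the symmetric difference has size <= 1.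
--     sigs = []
--     for s in box:
--         sig = set()
--         for c in s:
--             if c in sig:
--                 sig.remove(c)
--             else:
--                 sig.add(c)
--         sigs.append(sig)
--     total = 0
--     for i in range(len(sigs)):
--         for t in sigs[i + 1:]:
--             if len(sigs[i] ^ t) <= 1:
--                 total += 1
--     return total
-- ===== Notes on version B (the rewrite author's own statement) =====
-- stated objective: faster
-- what changed: A concatenates every pair of strings and counts each distinct character's occurrences in the concatenation (with an early break at two odd counts); B reduces each string once to its set of odd-count characters and counts a pair as good iff the symmetric difference of the two signatures has at most one element, so no concatenations are built and no per-pair character-count scans remain.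
import Mathlib
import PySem

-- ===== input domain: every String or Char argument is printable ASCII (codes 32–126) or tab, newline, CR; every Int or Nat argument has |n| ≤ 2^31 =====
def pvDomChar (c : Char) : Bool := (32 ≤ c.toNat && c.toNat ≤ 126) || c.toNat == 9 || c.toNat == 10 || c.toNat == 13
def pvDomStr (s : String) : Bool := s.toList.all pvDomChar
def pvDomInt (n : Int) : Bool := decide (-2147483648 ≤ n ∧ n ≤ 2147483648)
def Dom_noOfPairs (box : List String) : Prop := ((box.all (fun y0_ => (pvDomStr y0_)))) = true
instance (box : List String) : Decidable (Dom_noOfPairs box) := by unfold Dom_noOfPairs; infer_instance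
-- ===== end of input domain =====

-- B replaces A's build-all-concatenations-then-count-character-occurrences check by per-string
-- odd-parity character sets compared pairwise via symmetric difference (objective: faster).

-- ===== PORT A =====
-- Inner 'for t in set(a)' loop with its break: returns the increment (0 or 1) this a contributes to `false`.
-- Python's a.count(t) for the 1-character t produced by iterating set(a) is the character count:
-- ported exactly as List.count over a.toList.  set(a) is iterated in first-occurrence order
-- (PySem.Set.ofList); the loop's contribution does not depend on the iteration order.
def pvOddBreak (a : List Char) : List Char → Int → Int
  | [], _ => 0
  | t :: ts, odd =>
    let odd' := if a.count t % 2 == 1 then odd + 1 else odd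
    if odd' > 1 then 1 else pvOddBreak a ts odd'

def noOfPairs (box : List String) : Int :=
  let r := (PySem.List.pyRange 0 (box.length : Int) 1).foldl
    (fun r i => (PySem.List.slice box (some (i + 1)) none).foldl
      (fun r k => r ++ [PySem.List.pyGetD box i "" ++ k]) r) []
  let f := r.foldl (fun f a => f + pvOddBreak a.toList (PySem.Set.ofList a.toList) 0) 0
  (r.length : Int) - f

-- ===== PORT B =====
-- Parity signature of one string: the set of characters occurring an odd number of times.
def pvSig (s : String) : PySem.Set Char :=
  s.toList.foldl
    (fun sig c => if PySem.Set.contains sig c then PySem.Set.discard sig c else PySem.Set.add sig c)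
    PySem.Set.empty

def noOfPairs_alt (box : List String) : Int :=
  let sigs := box.foldl (fun sigs s => sigs ++ [pvSig s]) []
  (PySem.List.pyRange 0 (sigs.length : Int) 1).foldl
    (fun tot i => (PySem.List.slice sigs (some (i + 1)) none).foldl
      (fun tot t =>
        if PySem.Set.len (PySem.Set.symmDiff (PySem.List.pyGetD sigs i PySem.Set.empty) t) ≤ 1
        then tot + 1 else tot) tot) 0

-- ===== PRECONDITION & SPEC =====
def Spec_noOfPairs (box : List String) (out : Int) : Prop := out = noOfPairs_alt box
instance (box : List String) (out : Int) : Decidable (Spec_noOfPairs box out) := by unfold Spec_noOfPairs; infer_instance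

-- ===== CLAIM (what is proved, stated in full; the proofs are below) =====
def Claim_equal_noOfPairs : Prop := ∀ (box : List String), Dom_noOfPairs box → Spec_noOfPairs box (noOfPairs box)

-- ===== LEMMAS AND PROOFS =====

-- sum over a flatMap is the nested sum
theorem pv_sum_map_flatMap {α β : Type} (l : List α) (g : α → List β) (f : β → Int) :
    ((l.flatMap g).map f).sum = (l.map (fun a => ((g a).map f).sum)).sum := by
  induction l with
  | nil => simp
  | cons x xs ih => simp [List.flatMap_cons, ih]

theorem pv_len_sub_sum {β : Type} (f : β → Int) (l : List β) :
    (l.length : Int) - (l.map f).sum = (l.map (fun x => 1 - f x)).sum := by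
  induction l with
  | nil => simp
  | cons x xs ih =>
    simp only [List.map_cons, List.sum_cons, List.length_cons]
    push_cast
    omega

theorem pv_getD_map_sig (box : List String) (k : Nat) (h : k < box.length) :
    (box.map pvSig).getD k PySem.Set.empty = pvSig (box.getD k "") := by
  simp [List.getD, List.getElem?_map, List.getElem?_eq_getElem h]

-- invariant of the parity-toggle fold
theorem pv_sig_invariant (l : List Char) (acc : PySem.Set Char) (hn : acc.Nodup) :
    (List.foldl (fun sig c => if PySem.Set.contains sig c then PySem.Set.discard sig c
        else PySem.Set.add sig c) acc l).Nodup ∧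
    ∀ c, (c ∈ List.foldl (fun sig c => if PySem.Set.contains sig c then PySem.Set.discard sig c
        else PySem.Set.add sig c) acc l ↔ ((c ∈ acc) ↔ l.count c % 2 = 0)) := by
  induction l generalizing acc with
  | nil => simp [hn]
  | cons c0 l' ih =>
    simp only [List.foldl_cons]
    by_cases hc : PySem.Set.contains acc c0 = true
    · have hm : c0 ∈ acc := (PySem.Set.contains_iff acc c0).mp hc
      have hn' : (PySem.Set.discard acc c0).Nodup := PySem.Set.nodup_discard acc c0 hn
      obtain ⟨ihn, ihm⟩ := ih (PySem.Set.discard acc c0) hn'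
      rw [if_pos hc]
      refine ⟨ihn, fun c => ?_⟩
      rw [ihm c, PySem.Set.mem_discard]
      simp only [List.count_cons]
      by_cases hcc : c = c0
      · subst hcc; simp only [ne_eq, not_true_eq_false, and_false, false_iff, hm, true_iff,
          BEq.rfl, if_true]
        omega
      · simp [hcc, Ne.symm hcc]
    · have hm : c0 ∉ acc := fun h => hc ((PySem.Set.contains_iff acc c0).mpr h)
      have hn' : (PySem.Set.add acc c0).Nodup := PySem.Set.nodup_add acc c0 hn
      obtain ⟨ihn, ihm⟩ := ih (PySem.Set.add acc c0) hn'
      rw [if_neg hc]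
      refine ⟨ihn, fun c => ?_⟩
      rw [ihm c, PySem.Set.mem_add]
      simp only [List.count_cons]
      by_cases hcc : c = c0
      · subst hcc; simp only [or_true, true_iff, hm, false_iff, BEq.rfl, if_true]
        omega
      · simp [hcc, Ne.symm hcc]

theorem pv_sig_nodup (s : String) : (pvSig s).Nodup :=
  (pv_sig_invariant s.toList PySem.Set.empty (by simp [PySem.Set.empty])).1

theorem pv_mem_sig (s : String) (c : Char) : c ∈ pvSig s ↔ s.toList.count c % 2 = 1 := by
  have h := (pv_sig_invariant s.toList PySem.Set.empty (by simp [PySem.Set.empty])).2 c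
  simp only [PySem.Set.empty, List.not_mem_nil, false_iff] at h
  rw [pvSig]
  simp only [PySem.Set.empty]
  rw [h]
  omega

-- the break loop counts whether at least two distinct characters have odd count
theorem pv_oddBreak_eq (a : List Char) (ts : List Char) :
    ∀ (odd : Int), 0 ≤ odd → odd ≤ 1 →
    pvOddBreak a ts odd =
      if 2 ≤ odd + (ts.countP (fun t => a.count t % 2 == 1) : Int) then 1 else 0 := by
  induction ts with
  | nil => intro odd h0 h1; simp [pvOddBreak]; omega
  | cons t ts' ih =>
    intro odd h0 h1
    simp only [pvOddBreak, List.countP_cons]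
    by_cases hp : (a.count t % 2 == 1) = true
    · rw [if_pos hp]
      by_cases hb : odd + 1 > 1
      · rw [if_pos hb]
        push_cast [hp]
        simp only [if_true]
        split_ifs <;> omega
      · rw [if_neg hb, ih (odd + 1) (by omega) (by omega)]
        push_cast [hp]
        simp only [if_true]
        split_ifs <;> omega
    · rw [if_neg hp, if_neg (show ¬ odd > 1 by omega), ih odd h0 h1, if_neg hp]
      push_cast
      split_ifs <;> omega

theorem pv_count_eq (s t : String) :
    ((PySem.Set.ofList (s.toList ++ t.toList)).countP
        (fun c => (s.toList ++ t.toList).count c % 2 == 1) : Int)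
      = PySem.Set.len (PySem.Set.symmDiff (pvSig s) (pvSig t)) := by
  have hL : ((PySem.Set.ofList (s.toList ++ t.toList)).filter
      (fun c => (s.toList ++ t.toList).count c % 2 == 1)).Nodup :=
    (PySem.Set.nodup_ofList _).filter _
  have hR : (PySem.Set.symmDiff (pvSig s) (pvSig t)).Nodup :=
    PySem.Set.nodup_symmDiff _ _ (pv_sig_nodup s) (pv_sig_nodup t)
  have hperm : ((PySem.Set.ofList (s.toList ++ t.toList)).filter
      (fun c => (s.toList ++ t.toList).count c % 2 == 1)).Perm
      (PySem.Set.symmDiff (pvSig s) (pvSig t)) := by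
    rw [List.perm_ext_iff_of_nodup hL hR]
    intro c
    simp only [List.mem_filter, PySem.Set.mem_ofList, PySem.Set.mem_symmDiff, pv_mem_sig,
      List.count_append, List.mem_append, beq_iff_eq]
    rw [← List.count_pos_iff (a := c) (l := s.toList), ← List.count_pos_iff (a := c) (l := t.toList)]
    omega
  rw [List.countP_eq_length_filter, hperm.length_eq]
  simp [PySem.Set.len]

theorem pv_pointwise (s t : String) :
    1 - pvOddBreak (s ++ t).toList (PySem.Set.ofList (s ++ t).toList) 0
      = if PySem.Set.len (PySem.Set.symmDiff (pvSig s) (pvSig t)) ≤ 1 then (1 : Int) else 0 := by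
  rw [String.toList_append,
    pv_oddBreak_eq _ _ 0 le_rfl (by norm_num), ]
  have h := pv_count_eq s t
  rw [zero_add]
  rw [h]
  split_ifs <;> omega

-- ===== VERDICT (by name: the statement is the Claim_ definition above) =====
theorem noOfPairs_spec : Claim_equal_noOfPairs := by
  intro box _
  show noOfPairs box = noOfPairs_alt box
  have hsigs : box.foldl (fun sigs s => sigs ++ [pvSig s]) [] = box.map pvSig := by
    rw [PySem.List.foldl_append_singleton_eq_map]; simp
  simp only [noOfPairs, noOfPairs_alt, hsigs, List.length_map]
  simp only [PySem.List.pyRange_one, List.foldl_map, sub_zero, Int.toNat_natCast, zero_add]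
  -- A side: the r-building loop is a flatMap
  have hstepA : ∀ (r : List String), ∀ k ∈ List.range box.length,
      (PySem.List.slice box (some ((k : Int) + 1)) none).foldl
        (fun r k' => r ++ [PySem.List.pyGetD box (k : Int) "" ++ k']) r
      = r ++ (box.drop (k + 1)).map (fun kk => box.getD k "" ++ kk) := by
    intro r k hk
    rw [show ((k : Int) + 1) = ((k + 1 : Nat) : Int) by push_cast; ring,
      PySem.List.slice_from_natCast, PySem.List.pyGetD_natCast,
      PySem.List.foldl_append_singleton_eq_map]
  rw [PySem.List.foldl_congr_mem _ _ _ _ hstepA, PySem.List.foldl_append_eq_flatMap,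
    List.nil_append, PySem.List.foldl_add, zero_add, pv_len_sub_sum, pv_sum_map_flatMap]
  simp only [List.map_map, Function.comp_def, pv_pointwise]
  -- B side: each outer step adds the inner 0/1 sum
  have hstepB : ∀ (tot : Int), ∀ k ∈ List.range box.length,
      (PySem.List.slice (box.map pvSig) (some ((k : Int) + 1)) none).foldl
        (fun tot t =>
          if PySem.Set.len (PySem.Set.symmDiff
              (PySem.List.pyGetD (box.map pvSig) (k : Int) PySem.Set.empty) t) ≤ 1
          then tot + 1 else tot) tot
      = tot + ((box.drop (k + 1)).map (fun kk =>
          if PySem.Set.len (PySem.Set.symmDiff (pvSig (box.getD k "")) (pvSig kk)) ≤ 1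
          then (1 : Int) else 0)).sum := by
    intro tot k hk
    rw [show ((k : Int) + 1) = ((k + 1 : Nat) : Int) by push_cast; ring,
      PySem.List.slice_from_natCast, PySem.List.pyGetD_natCast,
      pv_getD_map_sig box k (List.mem_range.mp hk), ← List.map_drop, List.foldl_map,
      PySem.List.foldl_ite_add_one
        (p := fun kk => PySem.Set.len (PySem.Set.symmDiff (pvSig (box.getD k "")) (pvSig kk)) ≤ 1),
      ← PySem.List.sum_map_ite_one_zero]
    simp only [decide_eq_true_eq]
  rw [PySem.List.foldl_congr_mem _ _ _ _ hstepB, PySem.List.foldl_add, zero_add]
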